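-- pv_equiv track=rewrite | github.com/blackburi/python_algorithm_TIL | programmers/previous_examination/kakao/2022_kakao_tech_intership_118670.py | solution
-- ===== SOURCE A (Python) =====
-- from collections import deque
--
-- def solution(rc, operations):
--     rc = deque(rc)
--     # 행, 열
--     r, c = len(rc), len(rc[0])
--     # column 기준으로 좌측, 우측, 중앙을 나눠서 관리
--     # 세로 첫번째 줄
--     left_col = deque([rc[i][0] for i in range(r)])
--     # 세로 마지막 줄
--     right_col = deque([rc[i][c - 1] for i in range(r)])
--     # 나머지 중앙 부분
--     rows = deque([deque(rc[i][1:c - 1]) for i in range(r)])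
--
--     for operation in operations :
--         if operation == 'ShiftRow' :
--             left_col.appendleft(left_col.pop())
--             right_col.appendleft(right_col.pop())
--             rows.appendleft(rows.pop())
--         else :  # operation == 'Rotate'
--             rows[0].appendleft(left_col.popleft())
--             right_col.appendleft(rows[0].pop())
--             rows[r - 1].append(right_col.pop())
--             left_col.append(rows[r - 1].popleft())
--
--     # matrix 다시 병합
--     answer = []
--     for i in range(r):
--         answer.append([left_col[i]] + list(rows[i]) + [right_col[i]])
--     return answer
-- ===== SOURCE B (Python) =====
-- def solution(rc, operations):
--     # Pure coordinate-mapping re-implementation: the matrix is kept whole and each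
--     # operation builds a fresh matrix whose entry (i, j) is read directly from its
--     # source cell, instead of juggling three deques.
--     m = [list(row) for row in rc]
--     r, c = len(m), len(m[0])
--     for op in operations:
--         if op == 'ShiftRow':
--             m = [m[-1]] + m[:-1]
--         else:
--             m = [[rotated(m, r, c, i, j) for j in range(c)] for i in range(r)]
--     return m
--
--
-- def rotated(m, r, c, i, j):
--     # source value of cell (i, j) after rotating the outer ring clockwise by one
--     if i == 0 and j == 0:
--         return m[1][0]
--     if i == 0:
--         return m[0][j - 1]
--     if j == c - 1:
--         return m[i - 1][c - 1]
--     if i == r - 1 and j == 0: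
--         return m[r - 1][1]
--     if i == r - 1:
--         return m[r - 1][j + 1]
--     if j == 0:
--         return m[i + 1][0]
--     return m[i][j]
-- ===== Notes on version B (the rewrite author's own statement) =====
-- stated objective: simpler
-- what changed: A splits the matrix into three deques (left column, right column, middle rows) and mutates them; B keeps the matrix whole and builds each new matrix by reading every cell's value directly from its closed-form source cell (last row for ShiftRow, ring-neighbour for Rotate).
-- outside the precondition, e.g. on solution([[1], [2]], ['Rotate']): A returns [[2, 1], [2, 1]], B returns [[2], [1]]; on solution([[1, 2, 3]], ['Rotate']): A returns [[1, 3, 2]], B raises IndexError; on solution([[1, 2], [3, 4, 5]], []): A returns [[1, 2], [3, 4]], B returns [[1, 2], [3, 4, 5]]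
import Mathlib
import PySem

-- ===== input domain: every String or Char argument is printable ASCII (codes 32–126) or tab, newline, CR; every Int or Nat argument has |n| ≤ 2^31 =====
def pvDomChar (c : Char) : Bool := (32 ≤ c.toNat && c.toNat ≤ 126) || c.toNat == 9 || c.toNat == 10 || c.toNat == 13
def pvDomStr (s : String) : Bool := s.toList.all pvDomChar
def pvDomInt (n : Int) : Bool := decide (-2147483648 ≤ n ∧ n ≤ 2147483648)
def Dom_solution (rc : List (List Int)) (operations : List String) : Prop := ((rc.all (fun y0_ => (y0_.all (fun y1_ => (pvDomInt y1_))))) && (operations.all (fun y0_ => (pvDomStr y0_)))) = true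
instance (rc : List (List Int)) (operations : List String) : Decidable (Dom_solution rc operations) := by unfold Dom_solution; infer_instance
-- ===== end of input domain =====

-- B replaces A's three-deque bookkeeping by a whole-matrix rebuild whose entry (i,j) is read
-- directly from its closed-form source cell (objective: simpler); equality is about the return
-- value only (A does not observably mutate its arguments).

-- ===== PORT A =====

-- deque: d.appendleft(d.pop()) on a nonempty deque (Python raises on empty; excluded by Pre_)
def pyRotR {α : Type} (l : List α) : List α :=
  match l.getLast? with
  | some x => x :: l.dropLast
  | none => l

def stepA (r : Nat) (st : List Int × List Int × List (List Int)) (op : String) :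
    List Int × List Int × List (List Int) :=
  if op = "ShiftRow" then
    (pyRotR st.1, pyRotR st.2.1, pyRotR st.2.2)
  else
    -- rows[0].appendleft(left_col.popleft())
    let row0 := st.1.headD 0 :: st.2.2.headD []
    let left := st.1.drop 1
    -- right_col.appendleft(rows[0].pop())
    let right := row0.getLastD 0 :: st.2.1
    let row0 := row0.dropLast
    let rows := st.2.2.set 0 row0
    -- rows[r-1].append(right_col.pop())
    let rowl := rows.getD (r - 1) [] ++ [right.getLastD 0]
    let right := right.dropLast
    -- left_col.append(rows[r-1].popleft())
    let left := left ++ [rowl.headD 0]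
    let rows := rows.set (r - 1) (rowl.drop 1)
    (left, right, rows)

def solution (rc : List (List Int)) (operations : List String) : List (List Int) :=
  let r := rc.length
  let c := (rc.headD []).length
  let left := rc.map (fun row => row.getD 0 0)
  let right := rc.map (fun row => row.getD (c - 1) 0)
  let rows := rc.map (fun row => (row.drop 1).take (c - 2))  -- row[1:c-1] (c ≥ 2 under Pre_)
  let st := operations.foldl (stepA r) (left, right, rows)
  (List.range r).map (fun i => st.1.getD i 0 :: st.2.2.getD i [] ++ [st.2.1.getD i 0])

-- ===== PORT B =====

-- source value of cell (i,j) after rotating the outer ring clockwise by one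
def rotatedB (m : List (List Int)) (r c : Nat) (i j : Nat) : Int :=
  if i = 0 ∧ j = 0 then (m.getD 1 []).getD 0 0
  else if i = 0 then (m.getD 0 []).getD (j - 1) 0
  else if j = c - 1 then (m.getD (i - 1) []).getD (c - 1) 0
  else if i = r - 1 ∧ j = 0 then (m.getD (r - 1) []).getD 1 0
  else if i = r - 1 then (m.getD (r - 1) []).getD (j + 1) 0
  else if j = 0 then (m.getD (i + 1) []).getD 0 0
  else (m.getD i []).getD j 0

def stepB (r c : Nat) (m : List (List Int)) (op : String) : List (List Int) :=
  if op = "ShiftRow" then m.getLastD [] :: m.dropLast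
  else (List.range r).map (fun i => (List.range c).map (rotatedB m r c i))

def solution_alt (rc : List (List Int)) (operations : List String) : List (List Int) :=
  let r := rc.length
  let c := (rc.headD []).length
  operations.foldl (stepB r c) rc

-- ===== PRECONDITION & SPEC =====
-- Pre_ is the problem's natural domain: a rectangular matrix with at least 2 rows and 2 columns.
-- A raises outside it on empty/ragged-short inputs; where A still returns (one row, one column, or
-- ragged rows longer than the first), its value is an artefact of the deque split (duplicated or
-- silently truncated columns) — see the cited examples.
def Pre_solution (rc : List (List Int)) (operations : List String) : Prop :=
  2 ≤ rc.length ∧ 2 ≤ (rc.headD []).length ∧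
    ∀ row ∈ rc, row.length = (rc.headD []).length
instance (rc : List (List Int)) (operations : List String) : Decidable (Pre_solution rc operations) := by
  unfold Pre_solution; infer_instance

def pvWitness_solution : List (List Int) × List String :=
  ([[1, 2], [3, 4]], ["ShiftRow", "Rotate"])

def Spec_solution (rc : List (List Int)) (operations : List String) (out : List (List Int)) : Prop := out = solution_alt rc operations
instance (rc : List (List Int)) (operations : List String) (out : List (List Int)) : Decidable (Spec_solution rc operations out) := by unfold Spec_solution; infer_instance

-- ===== CLAIM (what is proved, stated in full; the proofs are below) =====
def Claim_equal_solution : Prop := ∀ (rc : List (List Int)) (operations : List String), Dom_solution rc operations → Pre_solution rc operations → Spec_solution rc operations (solution rc operations)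

-- ===== LEMMAS AND PROOFS =====

-- middle part of a row: row[1:-1]
def midRow (row : List Int) : List Int := (row.drop 1).dropLast

-- A's three-deque view of a full matrix
def splitM (m : List (List Int)) : List Int × List Int × List (List Int) :=
  (m.map (fun row => row.headD 0), m.map (fun row => row.getLastD 0), m.map midRow)


theorem headD_eq_getD (row : List Int) : row.headD 0 = row.getD 0 0 := by cases row <;> simp

theorem getElem_eq_getD {α : Type} (m : List α) (d : α) (i : Nat) (h : i < m.length) :
    m[i] = m.getD i d := by
  rw [List.getD_eq_getElem?_getD, List.getElem?_eq_getElem h]; rfl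

theorem headD_map_range (c : Nat) (f : Nat → Int) (hc : 0 < c) (d : Int) :
    ((List.range c).map f).headD d = f 0 := by
  cases c with
  | zero => omega
  | succ n => simp [List.range_succ_eq_map]

theorem dropLast_getLastD (row : List Int) (c : Nat) (h : row.length = c) (hc : 2 ≤ c) :
    row.dropLast.getLastD 0 = row.getD (c - 2) 0 := by
  rw [List.getLastD_eq_getLast?, List.getLast?_eq_getElem?, List.getD_eq_getElem?_getD]
  rw [List.getElem?_dropLast, if_pos (by simp [h]; omega)]
  simp [h]
  rw [show c - 1 - 1 = c - 2 by omega]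

theorem getLastD_eq_getD (row : List Int) (c : Nat) (h : row.length = c) (_hc : 1 ≤ c) :
    row.getLastD 0 = row.getD (c - 1) 0 := by
  rw [List.getLastD_eq_getLast?, List.getLast?_eq_getElem?, List.getD_eq_getElem?_getD, h]

theorem mid_append_last (row : List Int) (c : Nat) (h : row.length = c) (hc : 2 ≤ c) :
    midRow row ++ [row.getD (c - 1) 0] = row.drop 1 := by
  have hne : row.drop 1 ≠ [] := by
    rw [← List.length_pos_iff, List.length_drop]; omega
  have : row.getD (c - 1) 0 = (row.drop 1).getLast hne := by
    rw [List.getLast_eq_getElem, List.getD_eq_getElem?_getD,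
      List.getElem?_eq_getElem (by simp [h]; omega)]
    simp [h]
    congr 1; omega
  rw [this, midRow, List.dropLast_append_getLast]

theorem head_cons_mid (row : List Int) (h : 2 ≤ row.length) :
    row.headD 0 :: midRow row = row.dropLast := by
  match row, h with
  | a :: b :: t, _ => simp [midRow]

theorem dropLast_dropLast (row : List Int) (c : Nat) (h : row.length = c) :
    row.dropLast.dropLast = row.take (c - 2) := by
  rw [List.dropLast_eq_take, List.dropLast_eq_take, List.take_take]
  congr 1; simp [h]; omega

theorem headD_map {α : Type} (m : List (List Int)) (f : List Int → α) (h : m ≠ []) (d : α) :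
    (m.map f).headD d = f (m.getD 0 []) := by
  cases m with
  | nil => simp at h
  | cons a t => simp

theorem getLastD_map (m : List (List Int)) (f : List Int → Int) (h : m ≠ []) (d : Int) :
    (m.map f).getLastD d = f (m.getD (m.length - 1) []) := by
  have hl : 0 < m.length := List.length_pos_iff.mpr h
  rw [List.getLastD_eq_getLast?, List.getLast?_eq_getElem?, List.getElem?_map,
    List.getElem?_eq_getElem (by simp; omega), List.getD_eq_getElem?_getD,
    List.getElem?_eq_getElem (by omega)]
  simp

theorem getD_map {α : Type} (m : List (List Int)) (f : List Int → α) (i : Nat) (h : i < m.length) (d : α) :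
    (m.map f).getD i d = f (m.getD i []) := by
  rw [List.getD_eq_getElem?_getD, List.getD_eq_getElem?_getD, List.getElem?_map,
    List.getElem?_eq_getElem h]
  simp

theorem drop_one_headD (row : List Int) : (row.drop 1).headD 0 = row.getD 1 0 := by
  match row with
  | [] => simp
  | [a] => simp
  | a :: b :: t => simp

theorem stepA_rotate (r c : Nat) (hr : 2 ≤ r) (hc : 2 ≤ c) (m : List (List Int))
    (hlen : m.length = r) (hrow : ∀ row ∈ m, row.length = c) (op : String)
    (hop : ¬ op = "ShiftRow") :
    stepA r (splitM m) op =
      ((m.map (fun row => row.headD 0)).drop 1 ++ [(m.getD (r - 1) []).getD 1 0],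
       (m.getD 0 []).getD (c - 2) 0 :: (m.map (fun row => row.getLastD 0)).dropLast,
       ((m.map midRow).set 0 ((m.getD 0 []).take (c - 2))).set (r - 1)
         ((m.getD (r - 1) []).drop 2)) := by
  have hmne : m ≠ [] := by rw [← List.length_pos_iff]; omega
  have h0 : (m.getD 0 []).length = c := by
    rw [List.getD_eq_getElem?_getD, List.getElem?_eq_getElem (by omega)]
    exact hrow _ (List.getElem_mem _)
  have hrm : (m.getD (r - 1) []).length = c := by
    rw [List.getD_eq_getElem?_getD, List.getElem?_eq_getElem (by omega)]
    exact hrow _ (List.getElem_mem _)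
  rw [stepA, if_neg hop]
  simp only [splitM]
  rw [headD_map _ _ hmne, headD_map _ _ hmne, head_cons_mid _ (by omega),
    dropLast_getLastD _ c h0 hc, dropLast_dropLast _ c h0, List.getLastD_cons,
    getLastD_map _ _ hmne, hlen]
  rw [List.getD_eq_getElem?_getD (l := (m.map midRow).set 0 _),
    List.getElem?_set_ne (by omega), ← List.getD_eq_getElem?_getD,
    getD_map _ _ _ (by omega) [], getLastD_eq_getD _ c hrm (by omega),
    mid_append_last _ c hrm hc, drop_one_headD]
  have hR : m.map (fun row => row.getLastD 0) ≠ [] := by simp [hmne]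
  rw [List.dropLast_cons_of_ne_nil hR, List.drop_drop]

theorem comp1 (r c : Nat) (hr : 2 ≤ r) (hc : 2 ≤ c) (m : List (List Int))
    (hlen : m.length = r) (_hrow : ∀ row ∈ m, row.length = c) :
    ((List.range r).map (fun i => (List.range c).map (rotatedB m r c i))).map
        (fun row => row.headD 0) =
      (m.map (fun row => row.headD 0)).drop 1 ++ [(m.getD (r - 1) []).getD 1 0] := by
  apply List.ext_getElem?
  intro i
  simp only [List.getElem?_map, List.getElem?_append, List.getElem?_drop,
    List.length_map, List.length_drop, hlen]
  by_cases h : i < r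
  · rw [List.getElem?_range h]
    simp only [Option.map_some, headD_map_range c _ (by omega) 0]
    by_cases h1 : i < r - 1
    · rw [if_pos h1, List.getElem?_eq_getElem (by omega), Option.map_some]
      congr 1
      rw [headD_eq_getD, getElem_eq_getD _ [] _ (by omega)]
      unfold rotatedB
      by_cases h0 : i = 0
      · subst h0; norm_num
      · rw [if_neg (by omega), if_neg h0, if_neg (by omega), if_neg (by omega),
          if_neg (by omega), if_pos rfl, show 1 + i = i + 1 by omega]
    · rw [if_neg h1]
      have hieq : i = r - 1 := by omega
      subst hieq
      simp only [Nat.sub_self, List.getElem?_cons_zero]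
      congr 1
      unfold rotatedB
      rw [if_neg (by omega), if_neg (by omega), if_neg (by omega), if_pos ⟨rfl, rfl⟩]
  · rw [List.getElem?_eq_none (by simp; omega)]
    simp only [Option.map_none]
    rw [if_neg (by omega), List.getElem?_eq_none (by simp; omega)]

theorem getLastD_map_range (c : Nat) (f : Nat → Int) (hc : 0 < c) (d : Int) :
    ((List.range c).map f).getLastD d = f (c - 1) := by
  rw [List.getLastD_eq_getLast?, List.getLast?_eq_getElem?, List.getElem?_map]
  simp only [List.length_map, List.length_range]
  rw [List.getElem?_range (by omega)]
  simp

theorem comp2 (r c : Nat) (hr : 2 ≤ r) (hc : 2 ≤ c) (m : List (List Int))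
    (hlen : m.length = r) (hrow : ∀ row ∈ m, row.length = c) :
    ((List.range r).map (fun i => (List.range c).map (rotatedB m r c i))).map
        (fun row => row.getLastD 0) =
      (m.getD 0 []).getD (c - 2) 0 :: (m.map (fun row => row.getLastD 0)).dropLast := by
  apply List.ext_getElem?
  intro i
  simp only [List.getElem?_map]
  by_cases h : i < r
  · rw [List.getElem?_range h]
    simp only [Option.map_some, getLastD_map_range c _ (by omega) 0]
    cases i with
    | zero =>
      simp only [List.getElem?_cons_zero]
      congr 1
      unfold rotatedB
      rw [if_neg (by omega), if_pos rfl, show c - 1 - 1 = c - 2 by omega]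
    | succ n =>
      simp only [List.getElem?_cons_succ, List.getElem?_dropLast, List.getElem?_map,
        List.length_map, hlen]
      rw [if_pos (by omega), List.getElem?_eq_getElem (by omega), Option.map_some]
      congr 1
      unfold rotatedB
      rw [if_neg (by omega), if_neg (by omega), if_pos rfl,
        getLastD_eq_getD _ c (hrow _ (List.getElem_mem _)) (by omega),
        getElem_eq_getD _ [] _ (by omega)]
      simp
  · rw [List.getElem?_eq_none (by simp; omega)]
    simp only [Option.map_none]
    cases i with
    | zero => omega
    | succ n =>
      rw [List.getElem?_cons_succ, List.getElem?_eq_none (by simp [hlen]; omega)]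

theorem midRow_getElem? (l : List Int) (k : Nat) :
    (midRow l)[k]? = if k < l.length - 1 - 1 then l[1 + k]? else none := by
  rw [midRow, List.getElem?_dropLast, List.length_drop, List.getElem?_drop]

theorem comp3 (r c : Nat) (hr : 2 ≤ r) (hc : 2 ≤ c) (m : List (List Int))
    (hlen : m.length = r) (hrow : ∀ row ∈ m, row.length = c) :
    ((List.range r).map (fun i => (List.range c).map (rotatedB m r c i))).map midRow =
      ((m.map midRow).set 0 ((m.getD 0 []).take (c - 2))).set (r - 1)
        ((m.getD (r - 1) []).drop 2) := by
  have h0 : (m.getD 0 []).length = c := by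
    rw [List.getD_eq_getElem?_getD, List.getElem?_eq_getElem (by omega)]
    exact hrow _ (List.getElem_mem _)
  have hrm : (m.getD (r - 1) []).length = c := by
    rw [List.getD_eq_getElem?_getD, List.getElem?_eq_getElem (by omega)]
    exact hrow _ (List.getElem_mem _)
  have hrm' : (m[r - 1]?.getD []).length = c := hrm
  have h0' : (m[0]?.getD []).length = c := h0
  apply List.ext_getElem?
  intro i
  simp only [List.getElem?_map, List.getElem?_set, List.length_set, List.length_map, hlen]
  by_cases h : i < r
  · rw [List.getElem?_range h]
    simp only [Option.map_some]
    by_cases hir : i = r - 1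
    · subst hir
      rw [if_pos rfl, if_pos h]
      congr 1
      apply List.ext_getElem?
      intro k
      rw [midRow_getElem?]
      simp only [List.length_map, List.length_range, List.getElem?_map, List.getElem?_drop]
      by_cases hk : k < c - 1 - 1
      · rw [if_pos hk, List.getElem?_range (by omega), Option.map_some,
          List.getElem?_eq_getElem (by omega)]
        congr 1
        unfold rotatedB
        rw [if_neg (by omega), if_neg (by omega), if_neg (by omega), if_neg (by omega),
          if_pos rfl, getElem_eq_getD _ 0 _ (by omega)]
        congr 1
        omega
      · rw [if_neg hk, List.getElem?_eq_none (by simp [hrm']; omega)]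
    · rw [if_neg (fun e => hir e.symm)]
      by_cases hi0 : i = 0
      · subst hi0
        rw [if_pos rfl, if_pos (by omega)]
        congr 1
        apply List.ext_getElem?
        intro k
        rw [midRow_getElem?]
        simp only [List.length_map, List.length_range, List.getElem?_take, List.getElem?_map]
        by_cases hk : k < c - 1 - 1
        · rw [if_pos hk, List.getElem?_range (by omega), Option.map_some,
            if_pos (by omega), List.getElem?_eq_getElem (by omega)]
          congr 1
          unfold rotatedB
          rw [if_neg (by omega), if_pos rfl, getElem_eq_getD _ 0 _ (by omega)]
          congr 1
          omega
        · rw [if_neg hk, if_neg (by omega)]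
      · rw [if_neg (fun e => hi0 e.symm), List.getElem?_eq_getElem (by omega), Option.map_some]
        congr 1
        apply List.ext_getElem?
        intro k
        rw [midRow_getElem?, midRow_getElem?]
        simp only [List.length_map, List.length_range, List.getElem?_map,
          hrow _ (List.getElem_mem (by omega : i < m.length))]
        by_cases hk : k < c - 1 - 1
        · rw [if_pos hk, if_pos hk, List.getElem?_range (by omega), Option.map_some,
            List.getElem?_eq_getElem (by rw [hrow _ (List.getElem_mem _)]; omega)]
          congr 1
          unfold rotatedB
          rw [if_neg (by omega), if_neg (by omega), if_neg (by omega), if_neg (by omega),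
            if_neg (by omega), if_neg (by omega), getElem_eq_getD _ 0 _
              (by rw [hrow _ (List.getElem_mem _)]; omega), getElem_eq_getD _ [] _ (by omega)]
        · rw [if_neg hk, if_neg hk]
  · rw [List.getElem?_eq_none (by simp; omega), if_neg (by omega), if_neg (by omega),
      List.getElem?_eq_none (by simp [hlen]; omega), Option.map_none]

theorem pyRotR_map {α β : Type} (m : List α) (f : α → β) (h : m ≠ []) (d : α) :
    pyRotR (m.map f) = f (m.getLastD d) :: (m.map f).dropLast := by
  unfold pyRotR
  rw [List.getLast?_map]
  cases hm : m.getLast? with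
  | none => exact absurd (List.getLast?_eq_none_iff.mp hm) h
  | some a => simp [List.getLastD_eq_getLast?, hm]

theorem step_comm (r c : Nat) (hr : 2 ≤ r) (hc : 2 ≤ c) (m : List (List Int))
    (hlen : m.length = r) (hrow : ∀ row ∈ m, row.length = c) (op : String) :
    stepA r (splitM m) op = splitM (stepB r c m op) ∧
      (stepB r c m op).length = r ∧ ∀ row ∈ stepB r c m op, row.length = c := by
  have hmne : m ≠ [] := by rw [← List.length_pos_iff]; omega
  by_cases hop : op = "ShiftRow"
  · subst hop
    refine ⟨?_, ?_, ?_⟩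
    · rw [stepA, if_pos rfl, stepB, if_pos rfl]
      simp only [splitM, List.map_cons]
      rw [pyRotR_map _ _ hmne [], pyRotR_map _ _ hmne [], pyRotR_map _ _ hmne []]
      simp [List.map_dropLast]
    · rw [stepB, if_pos rfl]
      simp only [List.length_cons, List.length_dropLast]
      omega
    · intro row hmem
      rw [stepB, if_pos rfl] at hmem
      simp only [List.mem_cons] at hmem
      rcases hmem with h1 | h1
      · subst h1
        rw [List.getLastD_eq_getLast?, List.getLast?_eq_some_getLast hmne]
        exact hrow _ (List.getLast_mem hmne)
      · exact hrow _ (List.mem_of_mem_dropLast h1)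
  · refine ⟨?_, ?_, ?_⟩
    · rw [stepA_rotate r c hr hc m hlen hrow op hop, stepB, if_neg hop]
      exact Prod.ext (comp1 r c hr hc m hlen hrow).symm
        (Prod.ext (comp2 r c hr hc m hlen hrow).symm (comp3 r c hr hc m hlen hrow).symm)
    · simp [stepB, if_neg hop]
    · intro row hmem
      simp only [stepB, if_neg hop, List.mem_map] at hmem
      obtain ⟨i, _, hi⟩ := hmem
      subst hi
      simp


theorem fold_comm (r c : Nat) (hr : 2 ≤ r) (hc : 2 ≤ c) (ops : List String)
    (m : List (List Int)) (hlen : m.length = r) (hrow : ∀ row ∈ m, row.length = c) :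
    ops.foldl (stepA r) (splitM m) = splitM (ops.foldl (stepB r c) m) ∧
      (ops.foldl (stepB r c) m).length = r ∧ ∀ row ∈ ops.foldl (stepB r c) m, row.length = c := by
  induction ops generalizing m with
  | nil => exact ⟨rfl, hlen, hrow⟩
  | cons op ops ih =>
    obtain ⟨h1, h2, h3⟩ := step_comm r c hr hc m hlen hrow op
    simpa [List.foldl_cons, h1] using ih (stepB r c m op) h2 h3

theorem row_reassemble (row : List Int) (h : 2 ≤ row.length) :
    row.headD 0 :: (midRow row ++ [row.getLastD 0]) = row := by
  match row, h with
  | a :: b :: t, _ =>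
    simp only [midRow, List.headD_cons, List.drop_one, List.tail_cons,
      List.getLastD_eq_getLast?, List.getLast?_cons_cons]
    rw [show (b :: t).getLast?.getD 0 = (b :: t).getLast (by simp) by
      simp [List.getLast?_eq_some_getLast]]
    rw [List.dropLast_append_getLast]

theorem merge_split (r c : Nat) (hc : 2 ≤ c) (m : List (List Int))
    (hlen : m.length = r) (hrow : ∀ row ∈ m, row.length = c) :
    (List.range r).map (fun i =>
      (splitM m).1.getD i 0 :: (splitM m).2.2.getD i [] ++ [(splitM m).2.1.getD i 0]) = m := by
  apply List.ext_getElem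
  · simp [hlen]
  · intro i h1 h2
    have hi : i < m.length := by simpa using h2
    simp only [splitM, List.getElem_map, List.getElem_range,
      List.getD_eq_getElem?_getD, List.getElem?_map, List.getElem?_eq_getElem hi,
      Option.map_some, Option.getD_some]
    exact row_reassemble m[i] (by rw [hrow m[i] (List.getElem_mem hi)]; exact hc)

theorem init_split (rc : List (List Int)) (_h2 : 2 ≤ (rc.headD []).length)
    (hrow : ∀ row ∈ rc, row.length = (rc.headD []).length) :
    (rc.map (fun row => row.getD 0 0),
     rc.map (fun row => row.getD ((rc.headD []).length - 1) 0),
     rc.map (fun row => (row.drop 1).take ((rc.headD []).length - 2))) = splitM rc := by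
  unfold splitM
  refine congrArg₂ _ ?_ (congrArg₂ _ ?_ ?_) <;>
    apply List.map_congr_left <;> intro row hmem
  · cases row <;> simp
  · rw [← hrow row hmem]
    simp [List.getD_eq_getElem?_getD, List.getLastD_eq_getLast?, List.getLast?_eq_getElem?]
  · rw [← hrow row hmem]
    unfold midRow
    rw [List.dropLast_eq_take]
    congr 1; simp; omega

-- ===== VERDICT (by name: the statement is the Claim_ definition above) =====
theorem solution_spec : Claim_equal_solution := by
  intro rc ops _ hpre
  obtain ⟨hr, hc, hrow⟩ := hpre
  show solution rc ops = solution_alt rc ops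
  unfold solution solution_alt
  simp only
  rw [init_split rc hc hrow]
  obtain ⟨h1, h2, h3⟩ := fold_comm rc.length (rc.headD []).length hr hc ops rc rfl hrow
  rw [h1]
  exact merge_split _ _ hc _ h2 h3
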